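-- pv_equiv track=rewrite | github.com/anthonykqprice/sudoku-solver | sudoku.py | is_valid_group
-- ===== SOURCE A (Python) =====
-- def is_valid_group(group):
--     seen = []
--     for entry in group:
--         if entry in seen:
--             return False
--         if entry != 0:
--             seen.append(entry)
--     return True
-- ===== SOURCE B (Python) =====
-- def is_valid_group(group):
--     nonzero = [entry for entry in group if entry != 0]
--     return len(nonzero) == len(set(nonzero))
-- ===== Notes on version B (the rewrite author's own statement) =====
-- stated objective: simpler
-- what changed: Replaces the incremental seen-list scan with early return by building the nonzero sublist once and comparing its length to the size of its set of distinct elements.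
import Mathlib
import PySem

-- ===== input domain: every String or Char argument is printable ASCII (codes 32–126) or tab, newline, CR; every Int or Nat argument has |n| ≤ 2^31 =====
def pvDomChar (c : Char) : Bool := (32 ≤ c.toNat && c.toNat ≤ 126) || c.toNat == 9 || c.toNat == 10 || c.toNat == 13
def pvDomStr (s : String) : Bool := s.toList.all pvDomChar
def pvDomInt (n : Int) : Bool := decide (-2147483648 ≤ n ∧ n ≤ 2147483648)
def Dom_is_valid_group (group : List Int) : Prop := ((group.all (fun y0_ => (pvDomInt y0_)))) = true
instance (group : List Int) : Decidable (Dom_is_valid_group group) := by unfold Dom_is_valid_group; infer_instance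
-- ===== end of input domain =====

-- ===== PORT A =====
-- B builds the nonzero sublist once and compares its length with its set's size; objective: simpler.
-- loop over the remaining entries, carrying the 'seen' list (Python's for-loop with early return)
def isvgLoop (seen : List Int) : List Int → Bool
  | [] => true
  | entry :: rest =>
      if seen.contains entry then false
      else if entry ≠ 0 then isvgLoop (seen ++ [entry]) rest
      else isvgLoop seen rest

def is_valid_group (group : List Int) : Bool := isvgLoop [] group

-- ===== PORT B =====
def is_valid_group_alt (group : List Int) : Bool :=
  let nonzero := group.filter (fun entry => decide (entry ≠ 0))
  nonzero.length == (PySem.Set.ofList nonzero).length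

-- ===== PRECONDITION & SPEC =====
def Spec_is_valid_group (group : List Int) (out : Bool) : Prop := out = is_valid_group_alt group
instance (group : List Int) (out : Bool) : Decidable (Spec_is_valid_group group out) := by unfold Spec_is_valid_group; infer_instance

-- ===== CLAIM (what is proved, stated in full; the proofs are below) =====
def Claim_equal_is_valid_group : Prop := ∀ (group : List Int), Dom_is_valid_group group → Spec_is_valid_group group (is_valid_group group)

-- ===== LEMMAS AND PROOFS =====
theorem foldl_add_le (xs s : List Int) :
    (xs.foldl PySem.Set.add s).length ≤ s.length + xs.length := by
  induction xs generalizing s with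
  | nil => simp
  | cons x xs ih =>
      simp only [List.foldl]
      have h := ih (PySem.Set.add s x)
      have : (PySem.Set.add s x).length ≤ s.length + 1 := by
        simp only [PySem.Set.add]; split <;> simp
      simp only [List.length_cons]
      omega

theorem foldl_add_len (xs s : List Int) :
    (xs.foldl PySem.Set.add s).length = s.length + xs.length ↔
      (xs.Nodup ∧ ∀ x ∈ xs, x ∉ s) := by
  induction xs generalizing s with
  | nil => simp
  | cons x xs ih =>
      simp only [List.foldl, List.length_cons]
      by_cases hx : x ∈ s
      · have hadd : PySem.Set.add s x = s := by
          simp [PySem.Set.add, hx]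
        rw [hadd]
        have h := foldl_add_le xs s
        constructor
        · intro h'; omega
        · rintro ⟨-, hall⟩; exact absurd hx (hall x (by simp))
      · have hadd : PySem.Set.add s x = s ++ [x] := by
          simp [PySem.Set.add, hx]
        rw [hadd]
        have h2 := ih (s ++ [x])
        simp only [List.length_append, List.length_cons, List.length_nil] at h2
        rw [show s.length + (0 + 1) + xs.length = s.length + (xs.length + 1) by omega] at h2
        rw [h2]
        simp only [List.nodup_cons, List.mem_cons]
        constructor
        · rintro ⟨hnd, hall⟩
          have h3 : ∀ y ∈ xs, y ∉ s ∧ y ≠ x := by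
            intro y hy
            have := hall y hy
            simpa [not_or] using this
          refine ⟨⟨fun hm => (h3 x hm).2 rfl, hnd⟩, fun y hy => ?_⟩
          rcases hy with rfl | hy
          · exact hx
          · exact (h3 y hy).1
        · rintro ⟨⟨hxn, hnd⟩, hall⟩
          refine ⟨hnd, fun y hy => ?_⟩
          simp only [List.mem_append, List.mem_cons, List.not_mem_nil, or_false, not_or]
          refine ⟨hall y (Or.inr hy), ?_⟩
          intro h
          exact hxn (h ▸ hy)

theorem loop_iff (l seen : List Int) (h0 : (0 : Int) ∉ seen) :
    isvgLoop seen l = true ↔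
      ((l.filter (fun x => decide (x ≠ 0))).Nodup ∧
        ∀ x ∈ l.filter (fun x => decide (x ≠ 0)), x ∉ seen) := by
  induction l generalizing seen with
  | nil => simp [isvgLoop]
  | cons e rest ih =>
      by_cases he : e ∈ seen
      · have hne : e ≠ 0 := fun h => h0 (h ▸ he)
        simp only [isvgLoop, List.contains_iff_mem, he, if_pos,
          Bool.false_eq_true, false_iff]
        rintro ⟨-, hall⟩
        exact (hall e (by simp [List.mem_filter, hne])) he
      · by_cases hz : e = 0
        · subst hz
          simp only [isvgLoop, List.contains_iff_mem]
          rw [if_neg (by simpa using he), if_neg (by simp)]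
          rw [ih seen h0]
          simp
        · simp only [isvgLoop, List.contains_iff_mem]
          rw [if_neg (by simpa using he), if_pos (by simpa using hz)]
          rw [ih (seen ++ [e]) (by simp [h0]; omega)]
          rw [show List.filter (fun x => decide (x ≠ 0)) (e :: rest)
              = e :: List.filter (fun x => decide (x ≠ 0)) rest by simp [hz]]
          simp only [List.nodup_cons, List.mem_cons]
          constructor
          · rintro ⟨hnd, hall⟩
            have h3 : ∀ y ∈ List.filter (fun x => decide (x ≠ 0)) rest, y ∉ seen ∧ y ≠ e := by
              intro y hy
              have := hall y hy
              simpa [not_or] using this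
            refine ⟨⟨fun hm => (h3 e hm).2 rfl, hnd⟩, fun y hy => ?_⟩
            rcases hy with rfl | hy
            · exact he
            · exact (h3 y hy).1
          · rintro ⟨⟨hen, hnd⟩, hall⟩
            refine ⟨hnd, fun y hy => ?_⟩
            simp only [List.mem_append, List.mem_cons, List.not_mem_nil, or_false, not_or]
            refine ⟨hall y (Or.inr hy), ?_⟩
            intro h
            exact hen (h ▸ hy)

-- ===== VERDICT (by name: the statement is the Claim_ definition above) =====
theorem is_valid_group_spec : Claim_equal_is_valid_group := by
  intro group _
  unfold Spec_is_valid_group is_valid_group is_valid_group_alt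
  rw [show ∀ a b : Bool, a = b ↔ (a = true ↔ b = true) from by decide]
  rw [loop_iff group [] (by simp)]
  rw [beq_iff_eq]
  have h := foldl_add_len (group.filter (fun entry => decide (entry ≠ 0))) []
  simp only [List.length_nil, Nat.zero_add, List.not_mem_nil, not_false_iff,
    implies_true, and_true] at h
  rw [PySem.Set.ofList_eq_foldl]
  constructor
  · rintro ⟨hnd, -⟩
    exact (h.mpr hnd).symm
  · intro hlen
    exact ⟨h.mp hlen.symm, by simp⟩
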